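-- pv_equiv track=rewrite | github.com/arghomitra/Python | plate.py | forbidden
-- ===== SOURCE A (Python) =====
-- def forbidden(plate):
--     forbidden_patterns = [
--         'AAP', 'AAS', 'AEL', 'ALA', 'ANE', 'ASS', 'BEB', 'BIT', 'BOM', 'BOY',
--         'BSP', 'BUB', 'BWP', 'BYT', 'CAP', 'CDF', 'CDH', 'CDV', 'CON', 'CSP',
--         'CUB', 'CUL', 'CUT', 'CVP', 'DCD', 'DIK', 'DOM', 'FDF', 'FOK', 'FOL',
--         'FOU', 'FUC', 'FUK', 'GAT', 'GAY', 'GEK', 'GOD', 'HIV', 'HOL', 'JEK',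
--         'KAK', 'KKQ', 'KUL', 'KUT', 'LAF', 'LDD', 'LSP', 'LUL', 'MAS', 'MCC',
--         'MDP', 'MOR', 'MOU', 'MST', 'NIC', 'NIK', 'NIQ', 'NVA', 'PDB', 'PDO',
--         'PET', 'PFF', 'PIK', 'PIN', 'PIP', 'PIS', 'PJU', 'PKK', 'POT', 'PRL',
--         'PSB', 'PSC', 'PSL', 'PTB', 'PUE', 'PUT', 'PVV', 'PYK', 'PYN', 'PYP',
--         'PYS', 'ROM', 'SEX', 'SOA', 'SOT', 'SPA', 'SUL', 'TAK', 'TET', 'TIT',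
--         'TUE', 'VCD', 'VIH', 'VLD', 'VMO', 'VNV', 'ZAC', 'ZAK', 'ZOT'
--     ]
--
--     flag = False
--     for forbid in forbidden_patterns:
--         if forbid in plate:
--             flag = True
--             break
--     return flag
-- ===== SOURCE B (Python) =====
-- # Sorted integer codes ord(p[0])*65536 + ord(p[1])*256 + ord(p[2]) of the 99
-- # forbidden 3-letter patterns (the pattern list is alphabetical, so the codes
-- # are already in ascending order).
-- _CODES = [
--     4276560, 4276563, 4277580, 4279361, 4279877, 4281171, 4343106, 4344148,
--     4345677, 4345689, 4346704, 4347202, 4347728, 4348244, 4407632, 4408390,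
--     4408392, 4408406, 4411214, 4412240, 4412738, 4412748, 4412756, 4413008,
--     4473668, 4475211, 4476749, 4604998, 4607819, 4607820, 4607829, 4609347,
--     4609355, 4669780, 4669785, 4670795, 4673348, 4737366, 4738892, 4867403,
--     4931915, 4934481, 4937036, 4937044, 4997446, 4998212, 5002064, 5002572,
--     5062995, 5063491, 5063760, 5066578, 5066581, 5067604, 5130563, 5130571,
--     5130577, 5133889, 5260354, 5260367, 5260628, 5260870, 5261643, 5261646,
--     5261648, 5261651, 5261909, 5262155, 5263188, 5263948, 5264194, 5264195,
--     5264204, 5264450, 5264709, 5264724, 5264982, 5265739, 5265742, 5265744,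
--     5265747, 5394253, 5457240, 5459777, 5459796, 5460033, 5461324, 5521739,
--     5522772, 5523796, 5526853, 5653316, 5654856, 5655620, 5655887, 5656150,
--     5914947, 5914955, 5918548,
-- ]
--
-- def _lookup(code):
--     lo, hi = 0, len(_CODES)
--     while lo < hi:
--         mid = (lo + hi) // 2
--         if _CODES[mid] < code:
--             lo = mid + 1
--         else:
--             hi = mid
--     return lo < len(_CODES) and _CODES[lo] == code
--
-- def forbidden(plate):
--     for a, b, c in zip(plate, plate[1:], plate[2:]):
--         if _lookup(ord(a) * 65536 + ord(b) * 256 + ord(c)):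
--             return True
--     return False
-- ===== Notes on version B (the rewrite author's own statement) =====
-- stated objective: alternative
-- what changed: B replaces A's loop over 99 string patterns each scanning the plate by a single pass over the plate's 3-char windows, encoding each window as an integer ord-code and binary-searching it in a precomputed sorted list of the 99 pattern codes.
import Mathlib
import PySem

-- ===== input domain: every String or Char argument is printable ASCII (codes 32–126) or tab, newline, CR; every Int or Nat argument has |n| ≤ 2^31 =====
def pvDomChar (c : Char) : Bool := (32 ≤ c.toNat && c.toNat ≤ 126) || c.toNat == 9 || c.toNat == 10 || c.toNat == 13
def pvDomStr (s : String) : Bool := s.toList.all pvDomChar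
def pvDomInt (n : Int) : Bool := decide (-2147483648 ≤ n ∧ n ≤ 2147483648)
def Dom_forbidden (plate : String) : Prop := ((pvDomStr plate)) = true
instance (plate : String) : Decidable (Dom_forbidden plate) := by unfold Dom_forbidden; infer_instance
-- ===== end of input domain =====

-- B encodes each 3-char window of the plate as an integer and binary-searches it in a
-- sorted list of the 99 pattern codes, instead of A's loop over 99 string patterns each
-- scanning the plate (alternative algorithm; return value only).

-- ===== PORT A =====
-- the local list `forbidden_patterns` of A
def forbiddenA_patterns : List String := [
  "AAP", "AAS", "AEL", "ALA", "ANE", "ASS", "BEB", "BIT", "BOM", "BOY",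
  "BSP", "BUB", "BWP", "BYT", "CAP", "CDF", "CDH", "CDV", "CON", "CSP",
  "CUB", "CUL", "CUT", "CVP", "DCD", "DIK", "DOM", "FDF", "FOK", "FOL",
  "FOU", "FUC", "FUK", "GAT", "GAY", "GEK", "GOD", "HIV", "HOL", "JEK",
  "KAK", "KKQ", "KUL", "KUT", "LAF", "LDD", "LSP", "LUL", "MAS", "MCC",
  "MDP", "MOR", "MOU", "MST", "NIC", "NIK", "NIQ", "NVA", "PDB", "PDO",
  "PET", "PFF", "PIK", "PIN", "PIP", "PIS", "PJU", "PKK", "POT", "PRL",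
  "PSB", "PSC", "PSL", "PTB", "PUE", "PUT", "PVV", "PYK", "PYN", "PYP",
  "PYS", "ROM", "SEX", "SOA", "SOT", "SPA", "SUL", "TAK", "TET", "TIT",
  "TUE", "VCD", "VIH", "VLD", "VMO", "VNV", "ZAC", "ZAK", "ZOT"]

-- A's loop: flag starts False; first pattern with `forbid in plate` sets it and breaks
def forbiddenA_loop (plate : String) : List String → Bool
  | [] => false
  | forbid :: rest =>
      if PySem.Str.isIn forbid plate then true else forbiddenA_loop plate rest

def forbidden (plate : String) : Bool := forbiddenA_loop plate forbiddenA_patterns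

-- ===== PORT B =====
-- B's module-level _CODES: the patterns' ord-codes, ascending
def forbiddenB_codes : List Nat := [
  4276560, 4276563, 4277580, 4279361, 4279877, 4281171, 4343106, 4344148,
  4345677, 4345689, 4346704, 4347202, 4347728, 4348244, 4407632, 4408390,
  4408392, 4408406, 4411214, 4412240, 4412738, 4412748, 4412756, 4413008,
  4473668, 4475211, 4476749, 4604998, 4607819, 4607820, 4607829, 4609347,
  4609355, 4669780, 4669785, 4670795, 4673348, 4737366, 4738892, 4867403,
  4931915, 4934481, 4937036, 4937044, 4997446, 4998212, 5002064, 5002572,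
  5062995, 5063491, 5063760, 5066578, 5066581, 5067604, 5130563, 5130571,
  5130577, 5133889, 5260354, 5260367, 5260628, 5260870, 5261643, 5261646,
  5261648, 5261651, 5261909, 5262155, 5263188, 5263948, 5264194, 5264195,
  5264204, 5264450, 5264709, 5264724, 5264982, 5265739, 5265742, 5265744,
  5265747, 5394253, 5457240, 5459777, 5459796, 5460033, 5461324, 5521739,
  5522772, 5523796, 5526853, 5653316, 5654856, 5655620, 5655887, 5656150,
  5914947, 5914955, 5918548]

-- the `while lo < hi` loop of B's _lookup, followed by its final membership test
def forbiddenB_bsLoop (codes : List Nat) (code lo hi : Nat) : Bool :=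
  if lo < hi then
    let mid := (lo + hi) / 2
    if codes.getD mid 0 < code then forbiddenB_bsLoop codes code (mid + 1) hi
    else forbiddenB_bsLoop codes code lo mid
  else
    decide (lo < codes.length) && (codes.getD lo 0 == code)
termination_by hi - lo
decreasing_by all_goals omega

-- B's _lookup(code)
def forbiddenB_lookup (code : Nat) : Bool :=
  forbiddenB_bsLoop forbiddenB_codes code 0 forbiddenB_codes.length

-- for a, b, c in zip(plate, plate[1:], plate[2:]): if _lookup(ord(a)*65536+ord(b)*256+ord(c)): return True
def forbidden_alt (plate : String) : Bool :=
  (plate.toList.zip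
      (((PySem.Str.slice plate (some 1) none).toList).zip
        ((PySem.Str.slice plate (some 2) none).toList))).any
    (fun t => forbiddenB_lookup (t.1.toNat * 65536 + t.2.1.toNat * 256 + t.2.2.toNat))

-- ===== PRECONDITION & SPEC =====
def Spec_forbidden (plate : String) (out : Bool) : Prop := out = forbidden_alt plate
instance (plate : String) (out : Bool) : Decidable (Spec_forbidden plate out) := by unfold Spec_forbidden; infer_instance

-- ===== CLAIM (what is proved, stated in full; the proofs are below) =====
def Claim_equal_forbidden : Prop := ∀ (plate : String), Dom_forbidden plate → Spec_forbidden plate (forbidden plate)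

-- ===== LEMMAS AND PROOFS =====

-- encoding of a 3-char list (proof-side helper)
def forbiddenEnc : List Char → Nat
  | [a, b, c] => a.toNat * 65536 + b.toNat * 256 + c.toNat
  | _ => 0

set_option maxRecDepth 20000 in
theorem forbidden_codes_eq :
    forbiddenA_patterns.map (fun p => forbiddenEnc p.toList) = forbiddenB_codes := by
  decide

set_option maxRecDepth 20000 in
theorem forbidden_codes_sorted : forbiddenB_codes.Pairwise (· < ·) := by decide

set_option maxRecDepth 20000 in
theorem forbidden_patterns_shape_bool : forbiddenA_patterns.all
    (fun p => p.toList.length == 3 && p.toList.all (fun c => c.toNat ≤ 126)) = true := by decide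

theorem forbidden_patterns_shape :
    ∀ p ∈ forbiddenA_patterns,
      p.toList.length = 3 ∧ ∀ c ∈ p.toList, c.toNat ≤ 126 := by
  intro p hp
  have := List.all_eq_true.mp forbidden_patterns_shape_bool p hp
  simp only [Bool.and_eq_true, beq_iff_eq, List.all_eq_true, decide_eq_true_eq] at this
  exact this

-- A's early-exit loop is `any`
theorem forbiddenA_loop_eq_any (plate : String) (ps : List String) :
    forbiddenA_loop plate ps = ps.any (fun p => PySem.Str.isIn p plate) := by
  induction ps with
  | nil => rfl
  | cons p rest ih =>
      rw [List.any_cons, ← ih, forbiddenA_loop]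
      cases PySem.Str.isIn p plate <;> simp

-- a length-3 infix is exactly a take-3-of-drop window that fits
theorem forbidden_infix3_iff (p cs : List Char) (hp : p.length = 3) :
    p <:+: cs ↔ ∃ j : Nat, j + 2 < cs.length ∧ (cs.drop j).take 3 = p := by
  constructor
  · rintro ⟨s, t, rfl⟩
    refine ⟨s.length, by simp; omega, ?_⟩
    rw [List.append_assoc, List.drop_left]
    rw [List.take_append_of_le_length (by omega), List.take_of_length_le (by omega)]
  · rintro ⟨j, hj, rfl⟩
    exact ((cs.drop j).take_prefix 3).isInfix.trans (cs.drop_suffix j).isInfix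

-- the fitting window is the triple of consecutive elements
theorem forbidden_window_eq (cs : List Char) (j : Nat) (hj : j + 2 < cs.length) :
    (cs.drop j).take 3 =
      [cs[j]'(by omega), cs[j+1]'(by omega), cs[j+2]'(by omega)] := by
  apply List.ext_getElem
  · simp; omega
  · intro i h1 h2
    have h3 : i < 3 := by simp at h2; omega
    simp only [List.getElem_take, List.getElem_drop]
    interval_cases i <;> simp

-- binary-search loop correctness on a sorted list
theorem forbiddenB_bsLoop_correct (codes : List Nat) (hs : codes.Pairwise (· < ·))
    (code : Nat) :
    ∀ (d lo hi : Nat), hi - lo = d → lo ≤ hi → hi ≤ codes.length →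
      (∀ k, k < lo → codes.getD k 0 < code) →
      (∀ k, hi ≤ k → k < codes.length → code ≤ codes.getD k 0) →
      (forbiddenB_bsLoop codes code lo hi = true ↔ code ∈ codes) := by
  have hmono : ∀ (i j : Nat), i ≤ j → (hj : j < codes.length) →
      codes.getD i 0 ≤ codes.getD j 0 := by
    intro i j hij hj
    rcases Nat.lt_or_ge i j with h | h
    · have := (List.pairwise_iff_getElem.mp hs) i j (by omega) hj h
      simpa [List.getD_eq_getElem?_getD, List.getElem?_eq_getElem, hj,
        show i < codes.length by omega] using this.le
    · have : i = j := by omega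
      subst this; rfl
  intro d
  induction d using Nat.strong_induction_on with
  | _ d ih =>
    intro lo hi hd hle hlen hbelow habove
    rw [forbiddenB_bsLoop]
    by_cases h : lo < hi
    · simp only [h, if_true]
      have hmid1 : lo ≤ (lo + hi) / 2 := by omega
      have hmid2 : (lo + hi) / 2 < hi := by omega
      by_cases hc : codes.getD ((lo + hi) / 2) 0 < code
      · simp only [hc, if_true]
        refine ih (hi - ((lo + hi) / 2 + 1)) (by omega) _ _ rfl (by omega) hlen ?_ habove
        intro k hk
        exact lt_of_le_of_lt (hmono k ((lo + hi) / 2) (by omega) (by omega)) hc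
      · simp only [hc, if_false]
        refine ih ((lo + hi) / 2 - lo) (by omega) _ _ rfl (by omega) (by omega) hbelow ?_
        intro k hk hklen
        exact le_trans (Nat.le_of_not_lt hc) (hmono _ k hk hklen)
    · simp only [h, if_false]
      have hlohi : lo = hi := by omega
      constructor
      · intro hres
        rw [Bool.and_eq_true, decide_eq_true_eq, beq_iff_eq] at hres
        obtain ⟨hlt, heq⟩ := hres
        rw [← heq, List.getD_eq_getElem _ _ hlt]
        exact List.getElem_mem _
      · intro hmem
        obtain ⟨k, hk, hkeq⟩ := List.mem_iff_getElem.mp hmem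
        have hklo : lo ≤ k := by
          by_contra hkl
          have := hbelow k (by omega)
          rw [List.getD_eq_getElem _ _ hk, hkeq] at this
          omega
        have hlt : lo < codes.length := by omega
        have h1 : code ≤ codes.getD lo 0 := habove lo (by omega) hlt
        have h2 : codes.getD lo 0 ≤ code := by
          have := hmono lo k hklo hk
          rwa [List.getD_eq_getElem _ _ hk, hkeq] at this
        rw [Bool.and_eq_true, decide_eq_true_eq, beq_iff_eq]
        exact ⟨hlt, by omega⟩

theorem forbiddenB_lookup_iff (code : Nat) :
    forbiddenB_lookup code = true ↔ code ∈ forbiddenB_codes := by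
  exact forbiddenB_bsLoop_correct forbiddenB_codes forbidden_codes_sorted code
    (forbiddenB_codes.length) 0 forbiddenB_codes.length rfl (Nat.zero_le _) le_rfl
    (by omega) (by omega)

-- char codes agree → chars agree (ord is injective)
theorem forbidden_char_of_toNat {a b : Char} (h : a.toNat = b.toNat) : a = b :=
  Char.ext (UInt32.toNat_inj.mp h)

theorem forbidden_eq_alt (plate : String) (hdom : Dom_forbidden plate) :
    forbidden plate = forbidden_alt plate := by
  have hchars : ∀ c ∈ plate.toList, c.toNat ≤ 126 := by
    intro c hc
    have := List.all_eq_true.mp hdom c hc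
    simp only [pvDomChar, Bool.or_eq_true, Bool.and_eq_true, decide_eq_true_eq,
      beq_iff_eq] at this
    omega
  rw [forbidden, forbiddenA_loop_eq_any, forbidden_alt]
  have hslice1 : (PySem.Str.slice plate (some 1) none).toList = plate.toList.drop 1 := by
    simp [PySem.Str.toList_slice, PySem.List.slice_from]
  have hslice2 : (PySem.Str.slice plate (some 2) none).toList = plate.toList.drop 2 := by
    simp [PySem.Str.toList_slice, PySem.List.slice_from]
  rw [hslice1, hslice2, Bool.eq_iff_iff, List.any_eq_true, List.any_eq_true]
  constructor
  · rintro ⟨p, hp, hin⟩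
    obtain ⟨hlen3, _⟩ := forbidden_patterns_shape p hp
    rw [PySem.Str.isIn_iff_infix, forbidden_infix3_iff _ _ hlen3] at hin
    obtain ⟨j, hj, hw⟩ := hin
    rw [forbidden_window_eq plate.toList j hj] at hw
    refine ⟨(plate.toList[j]'(by omega), (plate.toList[j+1]'(by omega), plate.toList[j+2]'(by omega))), ?_, ?_⟩
    · rw [List.mem_iff_getElem]
      refine ⟨j, by simp only [List.length_zip, List.length_drop]; omega, ?_⟩
      simp [List.getElem_zip, List.getElem_drop, Nat.add_comm]
    · rw [forbiddenB_lookup_iff, ← forbidden_codes_eq, List.mem_map]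
      exact ⟨p, hp, by rw [← hw]; rfl⟩
  · rintro ⟨t, ht, hlk⟩
    obtain ⟨j, hjlen, hjt⟩ := List.mem_iff_getElem.mp ht
    have hj : j + 2 < plate.toList.length := by
      simp only [List.length_zip, List.length_drop] at hjlen; omega
    have htval : t = (plate.toList[j]'(by omega), (plate.toList[j+1]'(by omega), plate.toList[j+2]'(by omega))) := by
      rw [← hjt]; simp [List.getElem_zip, List.getElem_drop, Nat.add_comm]
    subst htval
    rw [forbiddenB_lookup_iff, ← forbidden_codes_eq, List.mem_map] at hlk
    obtain ⟨p, hp, hpe⟩ := hlk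
    obtain ⟨hlen3, hasc⟩ := forbidden_patterns_shape p hp
    obtain ⟨x, y, z, hxyz⟩ : ∃ x y z, p.toList = [x, y, z] := by
      match hpl : p.toList, hlen3 with
      | [x, y, z], _ => exact ⟨x, y, z, rfl⟩
    rw [hxyz] at hasc
    have hx := hasc x (by simp); have hy := hasc y (by simp); have hz := hasc z (by simp)
    have ha := hchars _ (List.getElem_mem (l := plate.toList) (n := j) (by omega))
    have hb := hchars _ (List.getElem_mem (l := plate.toList) (n := j+1) (by omega))
    have hc := hchars _ (List.getElem_mem (l := plate.toList) (n := j+2) (by omega))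
    rw [hxyz] at hpe
    simp only [forbiddenEnc] at hpe
    have hex : x.toNat = (plate.toList[j]'(by omega)).toNat ∧ y.toNat = (plate.toList[j+1]'(by omega)).toNat ∧
        z.toNat = (plate.toList[j+2]'(by omega)).toNat := by omega
    refine ⟨p, hp, ?_⟩
    rw [PySem.Str.isIn_iff_infix, forbidden_infix3_iff _ _ hlen3]
    refine ⟨j, hj, ?_⟩
    rw [forbidden_window_eq plate.toList j hj, hxyz,
      forbidden_char_of_toNat hex.1, forbidden_char_of_toNat hex.2.1,
      forbidden_char_of_toNat hex.2.2]

-- ===== VERDICT (by name: the statement is the Claim_ definition above) =====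
theorem forbidden_spec : Claim_equal_forbidden := by
  intro plate hdom
  exact forbidden_eq_alt plate hdom
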